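-- pv_equiv track=rewrite | github.com/jimmythefung/CodingProblems | Codefight/CommonTechniquesBasic/sumInRange.py | sumInRange
-- ===== SOURCE A (Python) =====
-- def sumInRange(nums, queries):
--     cache = [0]*len(nums)
--     tot = 0
--     for ind, val in enumerate(nums):
--         tot += val
--         cache[ind] = tot
--
--
--     tot = 0
--     for q in queries:
--         a, b = q[0], q[1]
--         tot += (cache[b] - cache[a] + nums[a])
--
--     return tot % (1000000007)
-- ===== SOURCE B (Python) =====
-- def sumInRange(nums, queries):
--     # No prefix-sum cache: each query's value is the element at b plus the
--     # difference of the prefix sums before b and before a.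
--     return sum(nums[q[1]] + sum(nums[:q[1]]) - sum(nums[:q[0]]) for q in queries) % (10 ** 9 + 7)
-- ===== Notes on version B (the rewrite author's own statement) =====
-- stated objective: simpler
-- what changed: B drops the prefix-sum cache and the two explicit loops, computing each query's value directly as nums[b] plus the difference of two prefix-slice sums (sum(nums[:b]) - sum(nums[:a])) inside one comprehension.
import Mathlib
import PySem

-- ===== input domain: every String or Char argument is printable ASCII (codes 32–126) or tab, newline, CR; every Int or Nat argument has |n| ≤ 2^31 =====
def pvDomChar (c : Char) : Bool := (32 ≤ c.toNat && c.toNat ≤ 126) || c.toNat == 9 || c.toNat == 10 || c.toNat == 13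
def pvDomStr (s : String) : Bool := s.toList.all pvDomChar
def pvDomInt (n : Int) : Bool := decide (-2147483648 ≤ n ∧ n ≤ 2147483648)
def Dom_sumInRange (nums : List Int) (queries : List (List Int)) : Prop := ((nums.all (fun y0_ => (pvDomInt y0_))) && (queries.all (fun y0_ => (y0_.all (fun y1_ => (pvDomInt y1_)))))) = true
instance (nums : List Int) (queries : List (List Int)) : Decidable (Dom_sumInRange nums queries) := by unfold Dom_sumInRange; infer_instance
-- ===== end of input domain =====

-- B replaces A's prefix-sum cache and two loops by a single comprehension of prefix-slice
-- sum differences (simpler; not faster).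


-- ===== PORT A =====
-- A's first loop body: tot += val; cache[ind] = tot  (state = (cache, tot))
def pvStep (st : List Int × Int) (iv : Int × Int) : List Int × Int :=
  (PySem.List.pySetD st.1 iv.1 (st.2 + iv.2), st.2 + iv.2)

def sumInRange (nums : List Int) (queries : List (List Int)) : Int :=
  let cache0 := List.replicate nums.length (0 : Int)
  let cache := ((PySem.List.enumerate nums).foldl pvStep (cache0, 0)).1
  let tot := queries.foldl
    (fun tot q =>
      let a := PySem.List.pyGetD q 0 0
      let b := PySem.List.pyGetD q 1 0
      tot + (PySem.List.pyGetD cache b 0 - PySem.List.pyGetD cache a 0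
             + PySem.List.pyGetD nums a 0)) 0
  PySem.Int.mod tot 1000000007

-- ===== PORT B =====
def sumInRange_alt (nums : List Int) (queries : List (List Int)) : Int :=
  PySem.Int.mod
    ((queries.map (fun q =>
        PySem.List.pyGetD nums (PySem.List.pyGetD q 1 0) 0
        + (PySem.List.slice nums none (some (PySem.List.pyGetD q 1 0))).sum
        - (PySem.List.slice nums none (some (PySem.List.pyGetD q 0 0))).sum)).sum)
    1000000007

-- ===== PRECONDITION & SPEC =====
-- Pre_ excludes exactly the queries on which A raises: fewer than two entries, or an
-- index outside [-len(nums), len(nums)).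
def Pre_sumInRange (nums : List Int) (queries : List (List Int)) : Prop :=
  ∀ q ∈ queries, 2 ≤ q.length ∧
    (-(nums.length : Int) ≤ PySem.List.pyGetD q 0 0 ∧ PySem.List.pyGetD q 0 0 < nums.length) ∧
    (-(nums.length : Int) ≤ PySem.List.pyGetD q 1 0 ∧ PySem.List.pyGetD q 1 0 < nums.length)

instance (nums : List Int) (queries : List (List Int)) : Decidable (Pre_sumInRange nums queries) := by
  unfold Pre_sumInRange; infer_instance

def pvWitness_sumInRange : List Int × List (List Int) := ([1, 2, 3], [[0, 2], [2, 0], [-3, -1]])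

def Spec_sumInRange (nums : List Int) (queries : List (List Int)) (out : Int) : Prop := out = sumInRange_alt nums queries
instance (nums : List Int) (queries : List (List Int)) (out : Int) : Decidable (Spec_sumInRange nums queries out) := by unfold Spec_sumInRange; infer_instance

-- ===== CLAIM (what is proved, stated in full; the proofs are below) =====
def Claim_equal_sumInRange : Prop := ∀ (nums : List Int) (queries : List (List Int)), Dom_sumInRange nums queries → Pre_sumInRange nums queries → Spec_sumInRange nums queries (sumInRange nums queries)

-- ===== LEMMAS AND PROOFS =====

lemma take_succ_sum (l : List Int) (j : Nat) (h : j < l.length) :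
    (l.take (j + 1)).sum = (l.take j).sum + l[j] := by
  rw [List.take_add_one, List.sum_append]
  simp [List.getElem?_eq_getElem h]

lemma fold_len (xs : List Int) (s : Int) (c : List Int) (t : Int) :
    ((PySem.List.enumerate xs s).foldl pvStep (c, t)).1.length = c.length := by
  induction xs generalizing s c t with
  | nil => simp [PySem.List.enumerate_nil]
  | cons x xs ih =>
      rw [PySem.List.enumerate_cons]
      simp only [List.foldl_cons, pvStep]
      rw [ih]
      simp [PySem.List.length_pySetD]

lemma fold_get (xs : List Int) (s : Nat) (c : List Int) (t : Int) (j : Nat)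
    (hs : s + xs.length ≤ c.length) (hj : j < c.length) :
    ((PySem.List.enumerate xs (s : Int)).foldl pvStep (c, t)).1.getD j 0
    = if s ≤ j ∧ j < s + xs.length then t + (xs.take (j - s + 1)).sum
      else c.getD j 0 := by
  induction xs generalizing s c t with
  | nil =>
      simp [PySem.List.enumerate_nil]
  | cons x xs ih =>
      rw [PySem.List.enumerate_cons]
      simp only [List.foldl_cons, pvStep]
      have hcast : (s : Int) + 1 = ((s + 1 : Nat) : Int) := by push_cast; ring
      rw [hcast]
      have hset : PySem.List.pySetD c (s : Int) (t + x) = c.set s (t + x) :=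
        PySem.List.pySetD_natCast c s (t + x)
      rw [hset]
      have hlen : (c.set s (t + x)).length = c.length := by simp
      have hs' : s + 1 + xs.length ≤ (c.set s (t + x)).length := by
        simp only [List.length_set, List.length_cons] at hs ⊢; omega
      have hj' : j < (c.set s (t + x)).length := by
        simp only [List.length_set]; omega
      rw [ih (s + 1) (c.set s (t + x)) (t + x) hs' hj']
      by_cases h1 : s + 1 ≤ j ∧ j < s + 1 + xs.length
      · rw [if_pos h1, if_pos (show s ≤ j ∧ j < s + (x :: xs).length by
          simp only [List.length_cons]; omega)]
        have : j - s + 1 = (j - (s + 1) + 1) + 1 := by omega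
        rw [this, List.take_succ_cons, List.sum_cons]
        have : j - (s + 1) + 1 = j - s := by omega
        rw [this]; ring
      · rw [if_neg h1]
        by_cases h2 : s ≤ j ∧ j < s + (x :: xs).length
        · have hjs : j = s := by simp at h2 ⊢; omega
          rw [if_pos h2, hjs]
          have : s - s + 1 = 1 := by omega
          rw [this, List.take_succ_cons]
          simp [List.getD, Nat.lt_of_le_of_lt (Nat.le_refl s) (by omega : s < c.length)]
        · rw [if_neg h2]
          have hne : j ≠ s := by simp at h2 ⊢; omega
          simp [List.getD, Ne.symm hne]

-- characterization of A's cache: cache[j] = sum of the first j+1 elements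
lemma cache_getD (nums : List Int) (j : Nat) (hj : j < nums.length) :
    ((PySem.List.enumerate nums).foldl pvStep (List.replicate nums.length (0 : Int), 0)).1.getD j 0
    = (nums.take (j + 1)).sum := by
  have h0 : (PySem.List.enumerate nums) = PySem.List.enumerate nums ((0 : Nat) : Int) := by norm_num
  rw [h0, fold_get nums 0 _ 0 j (by simp) (by simp [hj])]
  rw [if_pos ⟨Nat.zero_le j, by omega⟩]
  simp

lemma cache_len (nums : List Int) :
    ((PySem.List.enumerate nums).foldl pvStep (List.replicate nums.length (0 : Int), 0)).1.length
    = nums.length := by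
  have h0 : (PySem.List.enumerate nums) = PySem.List.enumerate nums ((0 : Nat) : Int) := by norm_num
  rw [h0, fold_len]; simp

-- cache[a] - nums[a] = sum(nums[:a])   for any valid python index a
lemma lo_part (nums cache : List Int) (hlen : cache.length = nums.length)
    (hc : ∀ j : Nat, j < nums.length → cache.getD j 0 = (nums.take (j + 1)).sum)
    (a : Int) (ha1 : -(nums.length : Int) ≤ a) (ha2 : a < nums.length) :
    PySem.List.pyGetD cache a 0 - PySem.List.pyGetD nums a 0
    = (PySem.List.slice nums none (some a)).sum := by
  by_cases h : 0 ≤ a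
  · have hna : a.toNat < nums.length := by omega
    have hca : a < (cache.length : Int) := by omega
    rw [PySem.List.pyGetD_eq_getElem cache 0 h hca,
        PySem.List.pyGetD_eq_getElem nums 0 h (by omega),
        PySem.List.slice_to nums h]
    have := hc a.toNat hna
    rw [List.getD_eq_getElem cache 0 (by omega)] at this
    rw [this, take_succ_sum nums a.toNat hna]
    ring
  · have hk : a = -(((-a).toNat : Nat) : Int) := by omega
    set k := (-a).toNat with hkdef
    have hk0 : 0 < k := by omega
    have hkn : k ≤ nums.length := by omega
    rw [hk, PySem.List.pyGetD_neg_natCast cache k 0 hk0 (by omega),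
        PySem.List.pyGetD_neg_natCast nums k 0 hk0 hkn,
        PySem.List.slice_to_neg_natCast nums k hk0]
    have hnk : nums.length - k < nums.length := by omega
    have := hc (nums.length - k) hnk
    rw [List.getD_eq_getElem cache 0 (by omega)] at this
    have hcl : cache.length - k = nums.length - k := by omega
    simp only [hcl]
    rw [this, take_succ_sum nums (nums.length - k) hnk]
    ring

-- per-query value equality under Pre_'s bounds
lemma qval (nums cache : List Int) (hlen : cache.length = nums.length)
    (hc : ∀ j : Nat, j < nums.length → cache.getD j 0 = (nums.take (j + 1)).sum)
    (a b : Int) (ha1 : -(nums.length : Int) ≤ a) (ha2 : a < nums.length)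
    (hb1 : -(nums.length : Int) ≤ b) (hb2 : b < nums.length) :
    PySem.List.pyGetD cache b 0 - PySem.List.pyGetD cache a 0 + PySem.List.pyGetD nums a 0
    = PySem.List.pyGetD nums b 0 + (PySem.List.slice nums none (some b)).sum
      - (PySem.List.slice nums none (some a)).sum := by
  have hA := lo_part nums cache hlen hc a ha1 ha2
  have hB := lo_part nums cache hlen hc b hb1 hb2
  -- cache[b] = nums[b] + sum(nums[:b]); cache[a] - nums[a] = sum(nums[:a])
  omega

-- ===== VERDICT (by name: the statement is the Claim_ definition above) =====
theorem sumInRange_spec : Claim_equal_sumInRange := by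
  intro nums queries _hdom hpre
  unfold Spec_sumInRange sumInRange sumInRange_alt
  simp only []
  set cache := ((PySem.List.enumerate nums).foldl pvStep (List.replicate nums.length (0 : Int), 0)).1 with hcache
  have hlen : cache.length = nums.length := cache_len nums
  have hc : ∀ j : Nat, j < nums.length → cache.getD j 0 = (nums.take (j + 1)).sum :=
    fun j hj => cache_getD nums j hj
  rw [PySem.List.foldl_add queries (fun q =>
        PySem.List.pyGetD cache (PySem.List.pyGetD q 1 0) 0
        - PySem.List.pyGetD cache (PySem.List.pyGetD q 0 0) 0
        + PySem.List.pyGetD nums (PySem.List.pyGetD q 0 0) 0) 0]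
  congr 1
  rw [zero_add]
  congr 1
  apply List.map_congr_left
  intro q hq
  obtain ⟨_, ⟨ha1, ha2⟩, hb1, hb2⟩ := hpre q hq
  exact qval nums cache hlen hc _ _ ha1 ha2 hb1 hb2
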